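-- pv_equiv track=rewrite | github.com/pothanamadhu/python_file | inbeweenrangedisapariumnumber.py | disaparium
-- ===== SOURCE A (Python) =====
-- def disaparium(n):
--       p=n
--       s=0
--       while(n):#175
--             r=n%10
--             n=n//10
--             s=s*10+r
--       n=s
--       s=r=0
--       k=1
--       while(n):#571
--             r=n%10
--             n=n//10
--             s=s+r**k
--             k=k+1
--       return s
-- ===== SOURCE B (Python) =====
-- def disaparium(n):
--     d = len(str(n))
--     s = 0
--     while n:
--         s += (n % 10) ** d
--         d -= 1
--         n //= 10
--     return s
-- ===== Notes on version B (the rewrite author's own statement) =====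
-- stated objective: simpler
-- what changed: B replaces A's two passes (reverse n into a new integer, then sum its digits with increasing exponents) by one pass over n itself with a descending exponent starting at len(str(n)), never building the reversed integer.
import Mathlib
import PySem

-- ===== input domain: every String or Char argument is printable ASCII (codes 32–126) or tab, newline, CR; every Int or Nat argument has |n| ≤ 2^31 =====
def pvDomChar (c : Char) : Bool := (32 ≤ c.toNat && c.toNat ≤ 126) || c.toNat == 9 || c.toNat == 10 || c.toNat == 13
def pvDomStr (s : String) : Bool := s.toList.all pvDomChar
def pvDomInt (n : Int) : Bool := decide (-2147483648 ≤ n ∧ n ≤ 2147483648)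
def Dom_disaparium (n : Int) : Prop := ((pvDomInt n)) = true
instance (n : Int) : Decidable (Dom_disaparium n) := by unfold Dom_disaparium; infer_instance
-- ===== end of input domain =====

-- B collapses A's two digit loops (reverse n into an integer, then power-sum its digits)
-- into one loop over n with a descending exponent starting at len(str(n)); objective: simpler.
-- On n < 0 both Pythons loop forever (excluded by Pre_).


-- termination helper for the digit loops (cited by decreasing_by)
theorem pvFdiv10_toNat_lt (n : Int) (h : 0 < n) : (PySem.Int.floordiv n 10).toNat < n.toNat := by
  simp only [PySem.Int.floordiv]
  rw [Int.fdiv_eq_ediv]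
  have : (0:Int) ≤ 10 := by norm_num
  simp only [this, true_or, if_true]
  omega

-- ===== PORT A =====
-- first while-loop of A: reverse n's digits into s (loop guard `while n`; for n < 0 the
-- Python loop never ends, so the port may stop there — such n are outside Pre_)
def pvLoopA1 (n s : Int) : Int :=
  if h : 0 < n then pvLoopA1 (PySem.Int.floordiv n 10) (s * 10 + PySem.Int.mod n 10) else s
termination_by n.toNat
decreasing_by exact pvFdiv10_toNat_lt n h

-- second while-loop of A: sum digits of n raised to increasing exponent k
def pvLoopA2 (n s : Int) (k : Nat) : Int :=
  if h : 0 < n then pvLoopA2 (PySem.Int.floordiv n 10) (s + (PySem.Int.mod n 10) ^ k) (k + 1) else s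
termination_by n.toNat
decreasing_by exact pvFdiv10_toNat_lt n h

def disaparium (n : Int) : Int := pvLoopA2 (pvLoopA1 n 0) 0 1

-- ===== PORT B =====
-- B's single while-loop: sum digits of n raised to a descending exponent d
def pvLoopB (n s : Int) (d : Nat) : Int :=
  if h : 0 < n then pvLoopB (PySem.Int.floordiv n 10) (s + (PySem.Int.mod n 10) ^ d) (d - 1) else s
termination_by n.toNat
decreasing_by exact pvFdiv10_toNat_lt n h

-- d = len(str(n)), taken via PySem.Str.len ∘ PySem.Int.toStr
def disaparium_alt (n : Int) : Int :=
  pvLoopB n 0 (PySem.Str.len (PySem.Int.toStr n)).toNat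

-- ===== PRECONDITION & SPEC =====
-- On n < 0 both Pythons loop forever (n//10 never reaches 0), so A never returns there.
def Pre_disaparium (n : Int) : Prop := 0 ≤ n
instance (n : Int) : Decidable (Pre_disaparium n) := by unfold Pre_disaparium; infer_instance
def pvWitness_disaparium : Int := (571)

def Spec_disaparium (n : Int) (out : Int) : Prop := out = disaparium_alt n
instance (n : Int) (out : Int) : Decidable (Spec_disaparium n out) := by unfold Spec_disaparium; infer_instance

-- ===== CLAIM (what is proved, stated in full; the proofs are below) =====
def Claim_equal_disaparium : Prop := ∀ (n : Int), Dom_disaparium n → Pre_disaparium n → Spec_disaparium n (disaparium n)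

-- ===== LEMMAS AND PROOFS =====

-- Python's // and % by 10 agree with Lean's Euclidean / and % (divisor positive)
theorem pvFloordiv10_eq (n : Int) : PySem.Int.floordiv n 10 = n / 10 := by
  simp only [PySem.Int.floordiv]; rw [Int.fdiv_eq_ediv]; simp

theorem pvMod10_eq (n : Int) : PySem.Int.mod n 10 = n % 10 := by
  simp only [PySem.Int.mod]; rw [Int.fmod_eq_emod]; simp

-- digit count of a nonnegative integer
def pvCnt (n : Int) : Nat := (Nat.digits 10 n.toNat).length

theorem pvCnt_zero : pvCnt 0 = 0 := by simp [pvCnt]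

theorem pvCnt_pos_step (n : Int) (h : 0 < n) :
    pvCnt n = pvCnt (PySem.Int.floordiv n 10) + 1 := by
  have hf := pvFloordiv10_eq n
  have htn : (n / 10).toNat = n.toNat / 10 := by omega
  have h0 : 0 < n.toNat := by omega
  simp only [pvCnt, hf, htn]
  rw [Nat.digits_def' (by norm_num : (1:ℕ) < 10) h0]
  simp

theorem pvLoopA1_nonpos (n s : Int) (h : ¬ 0 < n) : pvLoopA1 n s = s := by
  rw [pvLoopA1]; simp [h]

theorem pvLoopA2_nonpos (n s : Int) (k : Nat) (h : ¬ 0 < n) : pvLoopA2 n s k = s := by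
  rw [pvLoopA2]; simp [h]

theorem pvLoopB_nonpos (n s : Int) (d : Nat) (h : ¬ 0 < n) : pvLoopB n s d = s := by
  rw [pvLoopB]; simp [h]

-- additivity of A's second loop in its accumulator
theorem pvLoopA2_add (t : Nat) : ∀ (n s c : Int) (k : Nat), n.toNat ≤ t →
    pvLoopA2 n (s + c) k = pvLoopA2 n s k + c := by
  induction t with
  | zero =>
    intro n s c k ht
    have h : ¬ 0 < n := by omega
    rw [pvLoopA2_nonpos _ _ _ h, pvLoopA2_nonpos _ _ _ h]
  | succ t ih =>
    intro n s c k ht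
    by_cases h : 0 < n
    · conv_lhs => rw [pvLoopA2]
      conv_rhs => rw [pvLoopA2]
      simp only [h, dite_true]
      rw [show s + c + (PySem.Int.mod n 10) ^ k = (s + (PySem.Int.mod n 10) ^ k) + c by ring]
      exact ih _ _ _ _ (by have := pvFdiv10_toNat_lt n h; omega)
    · rw [pvLoopA2_nonpos _ _ _ h, pvLoopA2_nonpos _ _ _ h]

-- peeling the least significant digit off the accumulator of A's first loop
theorem pvLoopA2_peel (acc r s : Int) (E : Nat)
    (hacc : 0 ≤ acc) (hr0 : 0 ≤ r) (hr : r < 10) (hE : 1 ≤ E) :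
    pvLoopA2 (acc * 10 + r) s E = pvLoopA2 acc (s + r ^ E) (E + 1) := by
  by_cases hpos : 0 < acc * 10 + r
  · rw [pvLoopA2]
    have hd : PySem.Int.floordiv (acc * 10 + r) 10 = acc := by
      rw [pvFloordiv10_eq]; omega
    have hm : PySem.Int.mod (acc * 10 + r) 10 = r := by
      rw [pvMod10_eq]; omega
    simp only [hpos, dite_true]
    rw [hd, hm]
  · have hacc0 : acc = 0 := by omega
    have hr0' : r = 0 := by omega
    subst hacc0; subst hr0'
    rw [pvLoopA2_nonpos _ _ _ (by omega), pvLoopA2_nonpos _ _ _ (by omega)]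
    have hz : (0:Int) ^ E = 0 := zero_pow (by omega)
    simp [hz]

-- the main invariant: unwinding A's reverse-then-power-sum equals B's single loop
theorem pvMain (t : Nat) : ∀ (n acc s : Int) (e : Nat), n.toNat ≤ t → 0 ≤ n → 0 ≤ acc → 1 ≤ e →
    pvLoopA2 (pvLoopA1 n acc) s e
      = pvLoopB n (pvLoopA2 acc s (e + pvCnt n)) (e - 1 + pvCnt n) := by
  induction t with
  | zero =>
    intro n acc s e ht hn hacc he
    have hn0 : n = 0 := by omega
    subst hn0
    rw [pvLoopA1_nonpos _ _ (by omega), pvLoopB_nonpos _ _ _ (by omega)]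
    simp [pvCnt_zero]
  | succ t ih =>
    intro n acc s e ht hn hacc he
    by_cases h : 0 < n
    · have hf := pvFloordiv10_eq n
      have hm := pvMod10_eq n
      have hr0 : 0 ≤ PySem.Int.mod n 10 := by rw [hm]; omega
      have hr : PySem.Int.mod n 10 < 10 := by rw [hm]; omega
      have hq : 0 ≤ PySem.Int.floordiv n 10 := by rw [hf]; omega
      have hc : pvCnt n = pvCnt (PySem.Int.floordiv n 10) + 1 := pvCnt_pos_step n h
      have hlt := pvFdiv10_toNat_lt n h
      rw [pvLoopA1]; simp only [h, dite_true]
      rw [ih (PySem.Int.floordiv n 10) (acc * 10 + PySem.Int.mod n 10) s e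
        (by omega) hq (by positivity) he]
      rw [pvLoopA2_peel acc (PySem.Int.mod n 10) s (e + pvCnt (PySem.Int.floordiv n 10))
        hacc hr0 hr (by omega)]
      rw [pvLoopA2_add acc.toNat acc s _ _ (le_refl _)]
      conv_rhs => rw [pvLoopB]
      simp only [h, dite_true]
      rw [hc]
      have h1 : e + (pvCnt (PySem.Int.floordiv n 10) + 1)
          = e + pvCnt (PySem.Int.floordiv n 10) + 1 := by omega
      have h2 : e - 1 + (pvCnt (PySem.Int.floordiv n 10) + 1)
          = e + pvCnt (PySem.Int.floordiv n 10) := by omega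
      have h3 : e + pvCnt (PySem.Int.floordiv n 10) - 1
          = e - 1 + pvCnt (PySem.Int.floordiv n 10) := by omega
      rw [h1, h2, h3]
    · have hn0 : n = 0 := by omega
      subst hn0
      rw [pvLoopA1_nonpos _ _ (by omega), pvLoopB_nonpos _ _ _ (by omega)]
      simp [pvCnt_zero]

-- len(str(n)) = digit count, for n > 0
theorem pvToDigitsCore_len (f : Nat) : ∀ (n : Nat) (l : List Char), n < f → 0 < n →
    (Nat.toDigitsCore 10 f n l).length = (Nat.digits 10 n).length + l.length := by
  induction f with
  | zero => intro n l h _; omega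
  | succ f ih =>
    intro n l hnf hn
    rw [Nat.toDigitsCore]
    by_cases h : n / 10 = 0
    · have hlt : n < 10 := by omega
      rw [Nat.digits_def' (by norm_num : (1:ℕ) < 10) hn]
      simp [h]
      omega
    · simp only [h, if_false]
      have hq : 0 < n / 10 := Nat.pos_of_ne_zero h
      have hqf : n / 10 < f := by
        have : n / 10 < n := Nat.div_lt_self hn (by norm_num)
        omega
      rw [ih (n / 10) _ hqf hq]
      rw [Nat.digits_def' (by norm_num : (1:ℕ) < 10) hn]
      simp
      omega

theorem pvStrLen_eq_cnt (n : Int) (h : 0 < n) :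
    (PySem.Str.len (PySem.Int.toStr n)).toNat = pvCnt n := by
  have hts : (PySem.Int.toStr n).toList = PySem.Int.toChars n := PySem.Int.toList_toStr n
  have hn : ¬ n < 0 := by omega
  simp only [PySem.Str.len, hts, PySem.Int.toChars]
  rw [if_neg hn]
  simp only [Nat.toDigits]
  rw [pvToDigitsCore_len (n.toNat + 1) n.toNat [] (by omega) (by omega)]
  simp [pvCnt]

-- ===== VERDICT (by name: the statement is the Claim_ definition above) =====
theorem disaparium_spec : Claim_equal_disaparium := by
  intro n _ hpre
  unfold Pre_disaparium at hpre
  unfold Spec_disaparium disaparium disaparium_alt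
  by_cases h : 0 < n
  · rw [pvMain n.toNat n 0 0 1 (le_refl _) hpre (le_refl _) (le_refl _)]
    rw [pvLoopA2_nonpos 0 0 (1 + pvCnt n) (by omega)]
    rw [pvStrLen_eq_cnt n h]
    norm_num
  · have hn0 : n = 0 := by omega
    subst hn0
    rw [pvLoopA1_nonpos _ _ (by omega), pvLoopA2_nonpos _ _ _ (by omega),
      pvLoopB_nonpos _ _ _ (by omega)]
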